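-- pv_equiv track=rewrite | github.com/Ruben-hash/Type-construits | type_construit.py | pluriel
-- ===== SOURCE A (Python) =====
-- def pluriel(mot):
--   p = len(mot) - 2
--   for i in range(len(mot)):
--       if mot[-1] == "s":
--           mot = mot
--       elif mot[-1] == "l" and mot[-2] == "a":
--           mot = mot[0:p] + "aux"
--       elif mot[-1] != "s":
--           mot = mot+"s"
--   return mot
-- ===== SOURCE B (Python) =====
-- def pluriel(mot):
--     if not mot or mot.endswith("s"):
--         return mot
--     if mot.endswith("al"):
--         return mot[:-2] + "aux"
--     return mot + "s"
-- ===== Notes on version B (the rewrite author's own statement) =====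
-- stated objective: simpler
-- what changed: Replaces A's for-loop that rewrites the word len(mot) times (O(n^2) string rebuilding) with four direct guard/return cases and no loop.
-- intended difference: On words ending in 'al' A returns mot[:-2]+'auxs' (its loop appends an extra 's' after the aux-replacement, e.g. 'cheval' -> 'chevauxs'), B returns mot[:-2]+'aux' ('chevaux'), the correct French plural intended by the function. — e.g. on pluriel("cheval"): A returns "chevauxs", B returns "chevaux"
import Mathlib
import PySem

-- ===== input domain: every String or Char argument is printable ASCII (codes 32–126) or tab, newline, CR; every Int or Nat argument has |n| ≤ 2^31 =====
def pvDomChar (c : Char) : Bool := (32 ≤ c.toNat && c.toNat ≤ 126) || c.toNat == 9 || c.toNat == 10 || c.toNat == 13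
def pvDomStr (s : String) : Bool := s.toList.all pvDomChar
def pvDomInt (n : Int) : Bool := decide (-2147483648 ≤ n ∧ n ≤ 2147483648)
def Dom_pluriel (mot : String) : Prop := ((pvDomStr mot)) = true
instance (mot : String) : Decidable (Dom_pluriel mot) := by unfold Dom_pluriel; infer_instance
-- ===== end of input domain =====

-- B replaces A's rewrite-the-word-in-a-loop with four direct guarded returns (simpler, no loop);
-- on words ending in "al" B returns the plural without A's stray extra "s" (see D_ below).

-- ===== PORT A =====
-- one iteration of A's loop body (A's body ignores the loop index i); p is A's fixed slice bound
def pluStep (p : Int) (m : List Char) (_i : Nat) : List Char :=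
  if PySem.List.pyGetD m (-1) ' ' = 's' then m
  else if PySem.List.pyGetD m (-1) ' ' = 'l' ∧ PySem.List.pyGetD m (-2) ' ' = 'a' then
    PySem.List.slice m (some 0) (some p) ++ ['a', 'u', 'x']
  else if ¬ (PySem.List.pyGetD m (-1) ' ' = 's') then m ++ ['s']
  else m

def pluriel (mot : String) : String :=
  let cs := mot.toList
  let p : Int := (cs.length : Int) - 2
  String.ofList ((List.range cs.length).foldl (pluStep p) cs)

-- ===== PORT B =====
def pluriel_alt (mot : String) : String :=
  let cs := mot.toList
  if cs.isEmpty || PySem.Chars.endswith cs ['s'] then mot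
  else if PySem.Chars.endswith cs ['a', 'l'] then
    String.ofList (PySem.List.slice cs none (some (-2)) ++ ['a', 'u', 'x'])
  else String.ofList (cs ++ ['s'])

-- ===== PRECONDITION & SPEC =====
-- Pre_ excludes only the single-character word "l", on which A raises IndexError (it reads mot[-2]).
def Pre_pluriel (mot : String) : Prop := mot ≠ "l"
instance (mot : String) : Decidable (Pre_pluriel mot) := by unfold Pre_pluriel; infer_instance
def pvWitness_pluriel : String := "chat"

-- On words ending in "al" A returns mot[:-2]+"auxs" (its loop appends an extra 's' after the
-- aux-replacement, e.g. "cheval" -> "chevauxs"); B returns mot[:-2]+"aux" ("chevaux"), the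
-- correct French plural intended by the function.
def D_pluriel (mot : String) : Prop := PySem.Str.endswith mot "al" = true
instance (mot : String) : Decidable (D_pluriel mot) := by unfold D_pluriel; infer_instance

def Spec_pluriel (mot : String) (out : String) : Prop := ¬ D_pluriel mot → out = pluriel_alt mot
instance (mot : String) (out : String) : Decidable (Spec_pluriel mot out) := by unfold Spec_pluriel; infer_instance

def pvDiffWitness_pluriel : String := "cheval"
def pvDiffWitnessOut_pluriel : String × String := ("chevauxs", "chevaux")

-- ===== CLAIM (what is proved, stated in full; the proofs are below) =====
def Claim_unchanged_pluriel : Prop := ∀ (mot : String), Dom_pluriel mot → Pre_pluriel mot → Spec_pluriel mot (pluriel mot)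
def Claim_changed_pluriel : Prop := Dom_pluriel (pvDiffWitness_pluriel) ∧ Pre_pluriel (pvDiffWitness_pluriel) ∧ D_pluriel (pvDiffWitness_pluriel) ∧ pluriel (pvDiffWitness_pluriel) = pvDiffWitnessOut_pluriel.1 ∧ pluriel_alt (pvDiffWitness_pluriel) = pvDiffWitnessOut_pluriel.2 ∧ pvDiffWitnessOut_pluriel.1 ≠ pvDiffWitnessOut_pluriel.2
def Claim_exact_pluriel : Prop := ∀ (mot : String), Dom_pluriel mot → Pre_pluriel mot → D_pluriel mot → pluriel mot ≠ pluriel_alt mot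

-- ===== LEMMAS AND PROOFS =====

-- once the word ends in 's', every further iteration of A's loop leaves it unchanged
theorem pluStep_stable (p : Int) (l : List Nat) (m : List Char) :
    l.foldl (pluStep p) (m ++ ['s']) = m ++ ['s'] := by
  induction l with
  | nil => rfl
  | cons i l ih =>
    have h : pluStep p (m ++ ['s']) i = m ++ ['s'] := by
      simp [pluStep, PySem.List.pyGetD_neg_one_append_singleton]
    simpa [h] using ih

theorem suffix_concat_one {α : Type} {ys : List α} {c x : α} : [x] <:+ ys ++ [c] ↔ x = c := by
  constructor
  · rintro ⟨t, ht⟩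
    have := congrArg List.getLast? ht
    simpa using this
  · rintro rfl; exact ⟨ys, rfl⟩

theorem pyGetD_concat_pair (zs : List Char) (b c : Char) :
    PySem.List.pyGetD (zs ++ [b, c]) (-2) ' ' = b := by
  rw [PySem.List.pyGetD_neg_ofNat (zs ++ [b, c]) 2 ' ' (by omega) (by simp)]
  simp

-- first iteration on a word not ending in 's' nor "al" (and not the word "l"): append 's'
theorem pluStep_first (p : Int) (ys : List Char) (c : Char) (hc : c ≠ 's')
    (hpre : ys ++ [c] ≠ ['l']) (hD : ¬ (['a','l'] <:+ ys ++ [c])) (i : Nat) :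
    pluStep p (ys ++ [c]) i = (ys ++ [c]) ++ ['s'] := by
  unfold pluStep
  rw [PySem.List.pyGetD_neg_one_append_singleton]
  rw [if_neg hc, if_neg, if_pos hc]
  rintro ⟨hcl, ha⟩
  subst hcl
  rcases List.eq_nil_or_concat ys with rfl | ⟨zs, b, rfl⟩
  · exact hpre rfl
  · have hb : PySem.List.pyGetD (zs ++ [b, 'l']) (-2) ' ' = b := pyGetD_concat_pair zs b 'l'
    have he : zs.concat b ++ ['l'] = zs ++ [b, 'l'] := by simp
    rw [he] at ha hD
    rw [hb] at ha
    exact hD ⟨zs, by rw [ha]⟩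

-- iteration on a word ending "al": cut the last two letters and append "aux"
theorem pluStep_al (ys : List Char) (i : Nat) :
    pluStep (ys.length : Int) (ys ++ ['a', 'l']) i = ys ++ ['a', 'u', 'x'] := by
  unfold pluStep
  have h1 : PySem.List.pyGetD (ys ++ ['a', 'l']) (-1) ' ' = 'l' := by
    rw [show ys ++ ['a', 'l'] = (ys ++ ['a']) ++ ['l'] by simp]
    exact PySem.List.pyGetD_neg_one_append_singleton (ys ++ ['a']) 'l' ' '
  rw [h1, if_neg (by decide), if_pos ⟨rfl, pyGetD_concat_pair ys 'a' 'l'⟩]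
  rw [show (some (0 : Int)) = some ((0:Nat) : Int) by rfl]
  rw [PySem.List.slice_natCast]
  simp

-- iteration on a word ending "ux": append 's'
theorem pluStep_aux (zs : List Char) (p : Int) (i : Nat) :
    pluStep p (zs ++ ['u', 'x']) i = (zs ++ ['u', 'x']) ++ ['s'] := by
  unfold pluStep
  have h1 : PySem.List.pyGetD (zs ++ ['u', 'x']) (-1) ' ' = 'x' := by
    rw [show zs ++ ['u', 'x'] = (zs ++ ['u']) ++ ['x'] by simp]
    exact PySem.List.pyGetD_neg_one_append_singleton (zs ++ ['u']) 'x' ' '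
  rw [h1]
  simp

-- ===== VERDICT (by name: the statement is the Claim_ definition above) =====
theorem pluriel_spec : Claim_unchanged_pluriel := by
  intro mot _dom hpre hD
  show pluriel mot = pluriel_alt mot
  have hD' : ¬ (['a','l'] <:+ mot.toList) := by
    intro hs
    apply hD
    have hal : ("al" : String).toList = ['a','l'] := by decide
    show PySem.Str.endswith mot "al" = true
    simp [hal]
    exact (PySem.Chars.endswith_iff _ _).mpr hs
  rcases List.eq_nil_or_concat mot.toList with h | ⟨ys, c, h⟩
  · have hmot : mot = "" := by
      have := String.ofList_toList (s := mot)
      rw [h] at this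
      exact this.symm
    subst hmot; decide
  · rw [List.concat_eq_append] at h
    by_cases hc : c = 's'
    · subst hc
      have hA : pluriel mot = mot := by
        simp only [pluriel]
        rw [h, pluStep_stable]
        rw [← h, String.ofList_toList (s := mot)]
      have hB : pluriel_alt mot = mot := by
        simp only [pluriel_alt]
        rw [h]
        rw [if_pos]
        rw [(PySem.Chars.endswith_iff (ys ++ ['s']) ['s']).mpr ⟨ys, rfl⟩]
        simp
      rw [hA, hB]
    · have hpre' : ys ++ [c] ≠ ['l'] := by
        intro he
        apply hpre
        show mot = "l"
        rw [← String.ofList_toList (s := mot), h, he]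
      have hD2 : ¬ (['a','l'] <:+ ys ++ [c]) := by rw [← h]; exact hD'
      have hlen : mot.toList.length = ys.length + 1 := by rw [h]; simp
      have hA : pluriel mot = String.ofList ((ys ++ [c]) ++ ['s']) := by
        simp only [pluriel]
        rw [hlen, List.range_succ_eq_map, List.foldl_cons]
        rw [h, pluStep_first _ _ _ hc hpre' hD2, pluStep_stable]
      have hB : pluriel_alt mot = String.ofList ((ys ++ [c]) ++ ['s']) := by
        simp only [pluriel_alt]
        rw [h, if_neg, if_neg]
        · intro he
          exact hD2 ((PySem.Chars.endswith_iff _ _).mp he)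
        · intro he
          rw [Bool.or_eq_true] at he
          rcases he with he | he
          · simp at he
          · exact hc (suffix_concat_one.mp ((PySem.Chars.endswith_iff (ys ++ [c]) ['s']).mp he)).symm
      rw [hA, hB]

theorem pluriel_changed : Claim_changed_pluriel := by
  unfold Claim_changed_pluriel; decide

theorem pluriel_tight : Claim_exact_pluriel := by
  intro mot _dom _hpre hD
  have hs : ['a','l'] <:+ mot.toList := by
    have hal : ("al" : String).toList = ['a','l'] := by decide
    have hD2 : PySem.Str.endswith mot "al" = true := hD
    simp [hal] at hD2
    exact (PySem.Chars.endswith_iff _ _).mp hD2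
  obtain ⟨ys, h⟩ := hs
  rw [eq_comm] at h
  have hlen : mot.toList.length = ys.length + 2 := by rw [h]; simp
  have hp : ((ys.length + 2 : Nat) : Int) - 2 = (ys.length : Int) := by push_cast; ring
  have hA : pluriel mot = String.ofList (ys ++ ['a', 'u', 'x', 's']) := by
    simp only [pluriel]
    rw [hlen, hp, List.range_succ_eq_map, List.foldl_cons, h, pluStep_al]
    rw [List.range_succ_eq_map, List.map_cons, List.foldl_cons]
    rw [show ys ++ ['a', 'u', 'x'] = (ys ++ ['a']) ++ ['u', 'x'] by simp, pluStep_aux]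
    rw [show ((ys ++ ['a']) ++ ['u', 'x']) ++ ['s'] = (ys ++ ['a', 'u', 'x']) ++ ['s'] by simp]
    rw [pluStep_stable]
    simp
  have hB : pluriel_alt mot = String.ofList (ys ++ ['a', 'u', 'x']) := by
    simp only [pluriel_alt]
    rw [h, if_neg, if_pos ((PySem.Chars.endswith_iff _ _).mpr ⟨ys, rfl⟩)]
    · rw [PySem.List.slice_to_neg_ofNat _ 2 (by omega)]
      simp
    · intro he
      rw [Bool.or_eq_true] at he
      rcases he with he | he
      · simp at he
      · have := suffix_concat_one.mp (by
          rw [show ys ++ ['a','l'] = (ys ++ ['a']) ++ ['l'] by simp] at he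
          exact (PySem.Chars.endswith_iff _ _).mp he)
        exact absurd this (by decide)
  rw [hA, hB]
  intro heq
  have := congrArg String.toList heq
  simp at this
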